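-- pv_equiv track=rewrite | github.com/batkins33/DocTR_Process | check_repo_imports.py | map_module
-- ===== SOURCE A (Python) =====
-- from typing import Dict, Iterable, Iterator, List, Optional, Tuple
--
-- CANONICAL = "doctr_process"
--
-- OCR_SUBMODULES = {
--     "config_utils",
--     "input_picker",
--     "ocr_engine",
--     "ocr_utils",
--     "preflight",
--     "reporting_utils",
--     "vendor_utils",
-- }
--
-- def map_module(name: str) -> Optional[str]:
--     """Return suggested canonical path for legacy module ``name``.
--
--     If ``name`` is already canonical, ``None`` is returned.
--     """
--
--     if name.startswith("src."):
--         stripped = name[4:]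
--         mapped = map_module(stripped)
--         return mapped if mapped else stripped
--
--     parts = name.split(".")
--     head, tail = parts[0], parts[1:]
--
--     if head == CANONICAL:
--         return None
--     if head == "pipeline":
--         new_head = f"{CANONICAL}.pipeline"
--     elif head == "ocr":
--         new_head = f"{CANONICAL}.ocr"
--     elif head == "output":
--         new_head = f"{CANONICAL}.output"
--     elif head in OCR_SUBMODULES:
--         new_head = f"{CANONICAL}.ocr.{head}"
--         if tail:
--             new_head += "." + ".".join(tail)
--         return new_head
--     else:
--         return None
--
--     if tail:
--         new_head += "." + ".".join(tail)
--     return new_head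
-- ===== SOURCE B (Python) =====
-- from typing import Optional
--
-- CANONICAL = "doctr_process"
--
-- OCR_SUBMODULES = {
--     "config_utils",
--     "input_picker",
--     "ocr_engine",
--     "ocr_utils",
--     "preflight",
--     "reporting_utils",
--     "vendor_utils",
-- }
--
--
-- def map_module(name: str) -> Optional[str]:
--     """Return suggested canonical path for legacy module ``name``.
--
--     Iterative: strip every leading ``src.`` prefix once, then map the head
--     in a single place (no recursion, no cascaded returns).
--     """
--     core = name
--     had_src = False
--     while core.startswith("src."):
--         had_src = True
--         core = core[4:]
--
--     head, *tail = core.split(".")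
--     if head == CANONICAL:
--         mapped = None
--     elif head in ("pipeline", "ocr", "output"):
--         mapped = f"{CANONICAL}.{head}"
--     elif head in OCR_SUBMODULES:
--         mapped = f"{CANONICAL}.ocr.{head}"
--     else:
--         mapped = None
--
--     if mapped is not None and tail:
--         mapped += "." + ".".join(tail)
--
--     if mapped is None and had_src:
--         return core
--     return mapped
-- ===== Notes on version B (the rewrite author's own statement) =====
-- stated objective: simpler
-- what changed: B replaces A's self-recursion per 'src.' prefix and cascaded truthiness returns with one iterative strip (core, had_src) followed by a single head-mapping step and one tail append.
-- intended difference: On names consisting of two or more copies of 'src.' and nothing else, A's empty-string-is-falsy fallback bubbles the literal 'src.' back up and A returns 'src.'; B strips every legacy prefix and returns '' (the stripped core), which is the intended result of stripping. — e.g. on map_module("src.src."): A returns some "src.", B returns some ""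
import Mathlib
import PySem

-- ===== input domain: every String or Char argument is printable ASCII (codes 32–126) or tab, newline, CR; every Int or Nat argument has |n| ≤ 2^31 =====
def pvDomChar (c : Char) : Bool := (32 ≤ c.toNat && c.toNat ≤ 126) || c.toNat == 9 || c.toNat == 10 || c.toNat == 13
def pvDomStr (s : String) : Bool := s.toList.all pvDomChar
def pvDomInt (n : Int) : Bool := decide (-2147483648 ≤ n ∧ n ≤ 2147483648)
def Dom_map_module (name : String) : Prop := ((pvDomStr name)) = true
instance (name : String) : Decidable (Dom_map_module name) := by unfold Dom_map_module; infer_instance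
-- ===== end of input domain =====

-- B replaces A's recursive 'src.' stripping + cascaded returns by one iterative strip and a single head-mapping step (objective: simpler).


-- ===== PORT A =====
-- OCR_SUBMODULES (module-level set literal)
def ocrSubmodules : PySem.Set (List Char) :=
  PySem.Set.ofList ["config_utils".toList, "input_picker".toList, "ocr_engine".toList,
    "ocr_utils".toList, "preflight".toList, "vendor_utils".toList, "reporting_utils".toList]

-- the non-'src.' branch of A: parts = name.split("."); head/tail; the if/elif cascade
def mapPartsA (cs : List Char) : Option (List Char) :=
  let parts := PySem.Chars.splitOn cs ['.']
  let head := parts.headD []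
  let tail := parts.drop 1
  if head = "doctr_process".toList then none
  else if head = "pipeline".toList then
    let newHead := "doctr_process.pipeline".toList
    some (if tail ≠ [] then newHead ++ '.' :: PySem.Chars.join ['.'] tail else newHead)
  else if head = "ocr".toList then
    let newHead := "doctr_process.ocr".toList
    some (if tail ≠ [] then newHead ++ '.' :: PySem.Chars.join ['.'] tail else newHead)
  else if head = "output".toList then
    let newHead := "doctr_process.output".toList
    some (if tail ≠ [] then newHead ++ '.' :: PySem.Chars.join ['.'] tail else newHead)
  else if head ∈ ocrSubmodules then
    let newHead := "doctr_process.ocr.".toList ++ head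
    some (if tail ≠ [] then newHead ++ '.' :: PySem.Chars.join ['.'] tail else newHead)
  else none

-- A itself: name.startswith("src.") as the leading-pattern match, stripped = name[4:];
-- 'mapped if mapped else stripped' (None and "" are falsy)
def mapModuleA : List Char → Option (List Char)
  | 's' :: 'r' :: 'c' :: '.' :: stripped =>
      match mapModuleA stripped with
      | some m => if m = [] then some stripped else some m
      | none => some stripped
  | cs => mapPartsA cs

def map_module (name : String) : Option String :=
  (mapModuleA name.toList).map String.ofList

-- ===== PORT B =====
-- while core.startswith("src."): core = core[4:]  — returns (core, had_src)
def stripSrcB : List Char → List Char × Bool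
  | 's' :: 'r' :: 'c' :: '.' :: rest => ((stripSrcB rest).1, true)
  | cs => (cs, false)

-- the single head-mapping step of B
def mapHeadB (head : List Char) : Option (List Char) :=
  if head = "doctr_process".toList then none
  else if head = "pipeline".toList ∨ head = "ocr".toList ∨ head = "output".toList then
    some ("doctr_process.".toList ++ head)
  else if head ∈ ocrSubmodules then
    some ("doctr_process.ocr.".toList ++ head)
  else none

def mapCoreB (core : List Char) : Option (List Char) :=
  let parts := PySem.Chars.splitOn core ['.']
  let head := parts.headD []
  let tail := parts.drop 1
  match mapHeadB head with
  | some m => some (if tail ≠ [] then m ++ '.' :: PySem.Chars.join ['.'] tail else m)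
  | none => none

def map_module_alt (name : String) : Option String :=
  let p := stripSrcB name.toList
  match mapCoreB p.1 with
  | some m => some (String.ofList m)
  | none => if p.2 then some (String.ofList p.1) else none

-- ===== PRECONDITION & SPEC =====
-- On names that are two or more copies of "src." and nothing else, A's empty-string-is-falsy
-- fallback bubbles the literal "src." back up and A returns "src."; B strips every legacy
-- prefix and returns "", the stripped core, which is the intended value of the stripping.
def D_map_module (name : String) : Prop :=
  name.toList.take 4 = "src.".toList ∧ 8 ≤ name.toList.length ∧
    name.toList = List.flatten (List.replicate (name.toList.length / 4) ("src.".toList))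

instance (name : String) : Decidable (D_map_module name) := by
  unfold D_map_module; infer_instance

def Spec_map_module (name : String) (out : Option String) : Prop :=
  ¬ D_map_module name → out = map_module_alt name

instance (name : String) (out : Option String) : Decidable (Spec_map_module name out) := by
  unfold Spec_map_module; infer_instance

def pvDiffWitness_map_module : String := "src.src."
def pvDiffWitnessOut_map_module : (Option String) × (Option String) := (some "src.", some "")

-- ===== CLAIM (what is proved, stated in full; the proofs are below) =====
def Claim_unchanged_map_module : Prop :=
  ∀ (name : String), Dom_map_module name → Spec_map_module name (map_module name)
def Claim_changed_map_module : Prop :=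
  Dom_map_module (pvDiffWitness_map_module) ∧ D_map_module (pvDiffWitness_map_module) ∧
    map_module (pvDiffWitness_map_module) = pvDiffWitnessOut_map_module.1 ∧
    map_module_alt (pvDiffWitness_map_module) = pvDiffWitnessOut_map_module.2 ∧
    pvDiffWitnessOut_map_module.1 ≠ pvDiffWitnessOut_map_module.2
def Claim_exact_map_module : Prop :=
  ∀ (name : String), Dom_map_module name → D_map_module name →
    map_module name ≠ map_module_alt name

-- ===== LEMMAS AND PROOFS =====

-- number of leading "src." prefixes
def numSrc : List Char → Nat
  | 's' :: 'r' :: 'c' :: '.' :: rest => numSrc rest + 1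
  | _ => 0

-- proof-only helper: 'the string is copies of "src." and nothing else'
def allSrcOnly : List Char → Bool
  | 's' :: 'r' :: 'c' :: '.' :: rest => allSrcOnly rest
  | cs => cs.isEmpty

-- one-step unfolding lemmas for the catch-all branches
theorem stripSrcB_not (cs : List Char)
    (hne : ∀ rest, cs ≠ 's' :: 'r' :: 'c' :: '.' :: rest) : stripSrcB cs = (cs, false) := by
  rw [stripSrcB.eq_def]; split
  · rename_i r; exact absurd rfl (hne r)
  · rfl

theorem mapModuleA_not (cs : List Char)
    (hne : ∀ rest, cs ≠ 's' :: 'r' :: 'c' :: '.' :: rest) : mapModuleA cs = mapPartsA cs := by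
  rw [mapModuleA.eq_def]; split
  · exact absurd rfl (hne _)
  · rfl

theorem numSrc_not (cs : List Char)
    (hne : ∀ rest, cs ≠ 's' :: 'r' :: 'c' :: '.' :: rest) : numSrc cs = 0 := by
  rw [numSrc.eq_def]; split
  · rename_i r; exact absurd rfl (hne r)
  · rfl

theorem allSrcOnly_not (cs : List Char)
    (hne : ∀ rest, cs ≠ 's' :: 'r' :: 'c' :: '.' :: rest) : allSrcOnly cs = cs.isEmpty := by
  rw [allSrcOnly.eq_def]; split
  · rename_i r; exact absurd rfl (hne r)
  · rfl

theorem allSrcOnly_flatten (n : Nat) :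
    allSrcOnly (List.flatten (List.replicate n ("src.".toList))) = true := by
  induction n with
  | zero => rfl
  | succ n ih =>
      rw [List.replicate_succ, List.flatten_cons]
      show allSrcOnly ('s' :: 'r' :: 'c' :: '.' :: _) = true
      rw [allSrcOnly]
      exact ih

theorem srcShape (cs : List Char) :
    (∃ rest, cs = 's' :: 'r' :: 'c' :: '.' :: rest) ∨
      (∀ rest, cs ≠ 's' :: 'r' :: 'c' :: '.' :: rest) := by
  induction cs using stripSrcB.induct with
  | case1 rest _ => exact .inl ⟨rest, rfl⟩
  | case2 cs hne => exact .inr fun r h => hne r h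

theorem take4_of_numSrc_pos (cs : List Char) (h : 1 ≤ numSrc cs) :
    cs.take 4 = "src.".toList := by
  rcases srcShape cs with ⟨r, rfl⟩ | hne
  · rfl
  · rw [numSrc_not cs hne] at h; omega

theorem mapPartsA_eq_mapCoreB (cs : List Char) : mapPartsA cs = mapCoreB cs := by
  unfold mapPartsA mapCoreB mapHeadB
  dsimp only
  split_ifs <;> simp_all

theorem mapCoreB_ne_nil (cs : List Char) (m : List Char) (h : mapCoreB cs = some m) :
    m ≠ [] := by
  unfold mapCoreB mapHeadB at h
  dsimp only at h
  split_ifs at h <;> simp_all <;> intro hm <;> rw [hm] at h <;> simp at h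

theorem stripSrcB_core_nil_len (cs : List Char) (h : (stripSrcB cs).1 = []) :
    cs.length = 4 * numSrc cs := by
  induction cs using stripSrcB.induct with
  | case1 rest ih =>
      rw [stripSrcB] at h
      have := ih h
      simp only [List.length_cons, numSrc]
      omega
  | case2 cs hne =>
      rw [stripSrcB_not cs hne] at h
      rw [numSrc_not cs hne]
      simp at h
      simp [h]

theorem allSrcOnly_iff (cs : List Char) :
    allSrcOnly cs = true ↔ (stripSrcB cs).1 = [] := by
  induction cs using stripSrcB.induct with
  | case1 rest ih => rw [allSrcOnly, stripSrcB]; exact ih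
  | case2 cs hne =>
      rw [allSrcOnly_not cs hne, stripSrcB_not cs hne]
      simp

theorem allSrcOnly_eq (cs : List Char) (h : allSrcOnly cs = true) :
    cs = List.flatten (List.replicate (cs.length / 4) ("src.".toList)) := by
  induction cs using stripSrcB.induct with
  | case1 rest ih =>
      rw [allSrcOnly] at h
      have hq : ('s' :: 'r' :: 'c' :: '.' :: rest).length / 4 = rest.length / 4 + 1 := by
        simp; omega
      rw [hq, List.replicate_succ, List.flatten_cons]
      exact congrArg (fun l => 's' :: 'r' :: 'c' :: '.' :: l) (ih h)
  | case2 cs hne =>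
      rw [allSrcOnly_not cs hne] at h
      simp at h
      simp [h]

theorem stripSrcB_had_false (cs : List Char) (h : (stripSrcB cs).2 = false) :
    stripSrcB cs = (cs, false) ∧ numSrc cs = 0 := by
  rcases srcShape cs with ⟨r, rfl⟩ | hne
  · rw [stripSrcB] at h; simp at h
  · exact ⟨stripSrcB_not cs hne, numSrc_not cs hne⟩

theorem numSrc_pos_of_had (cs : List Char) (h : (stripSrcB cs).2 = true) :
    1 ≤ numSrc cs := by
  rcases srcShape cs with ⟨r, rfl⟩ | hne
  · rw [numSrc]; omega
  · rw [stripSrcB_not cs hne] at h; simp at h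

-- full characterisation of A in terms of B's pieces
theorem mapModuleA_char (cs : List Char) :
    mapModuleA cs =
      match mapCoreB (stripSrcB cs).1 with
      | some m => some m
      | none =>
          if (stripSrcB cs).2 then
            some (if (stripSrcB cs).1 = [] ∧ 2 ≤ numSrc cs then "src.".toList
                  else (stripSrcB cs).1)
          else none := by
  induction cs using stripSrcB.induct with
  | case2 cs hne =>
      rw [mapModuleA_not cs hne, stripSrcB_not cs hne, mapPartsA_eq_mapCoreB]
      cases mapCoreB cs <;> simp
  | case1 stripped ih =>
      rw [mapModuleA, stripSrcB, numSrc, ih]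
      rcases hmc : mapCoreB (stripSrcB stripped).1 with _ | m
      · rcases hhad : (stripSrcB stripped).2 with _ | _
        · obtain ⟨hstr, hns⟩ := stripSrcB_had_false stripped hhad
          rw [hstr] at hmc ⊢
          simp only [hmc, hns]
          by_cases hnil : stripped = [] <;> simp [hnil]
        · have hns1 := numSrc_pos_of_had stripped hhad
          simp only [hmc, hhad, if_true]
          by_cases hnil : (stripSrcB stripped).1 = []
          · by_cases h2 : 2 ≤ numSrc stripped
            · have h2' : 2 ≤ numSrc stripped + 1 := by omega
              simp [hnil, h2, h2']
            · have hns : numSrc stripped = 1 := by omega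
              have hlen : stripped.length = 4 := by
                have := stripSrcB_core_nil_len stripped hnil
                omega
              have hstr : stripped = 's' :: 'r' :: 'c' :: '.' :: [] := by
                rcases srcShape stripped with ⟨r, rfl⟩ | hne2
                · simp at hlen
                  rw [hlen]
                · rw [numSrc_not stripped hne2] at hns; omega
              subst hstr
              simp [hnil, hns]
          · have h2' : ¬ ((stripSrcB stripped).1 = [] ∧ 2 ≤ numSrc stripped) := by
              rintro ⟨h, _⟩; exact hnil h
            simp only [h2', if_false]
            simp [hnil]
      · have hne' := mapCoreB_ne_nil _ _ hmc
        simp [hmc, hne']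

-- ===== VERDICT =====
theorem map_module_spec : Claim_unchanged_map_module := by
  intro name _
  unfold Spec_map_module
  intro hnd
  unfold map_module map_module_alt
  rw [mapModuleA_char]
  dsimp only
  rcases hmc : mapCoreB (stripSrcB name.toList).1 with _ | m
  · rcases hhad : (stripSrcB name.toList).2 with _ | _
    · simp [hmc, hhad]
    · have : ¬ ((stripSrcB name.toList).1 = [] ∧ 2 ≤ numSrc name.toList) := by
        rintro ⟨h1, h2⟩
        have hlen := stripSrcB_core_nil_len _ h1
        refine hnd ⟨take4_of_numSrc_pos _ (by omega), by omega,
          allSrcOnly_eq _ ((allSrcOnly_iff _).2 h1)⟩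
      simp [hmc, hhad, this]
  · simp [hmc]

theorem map_module_changed : Claim_changed_map_module := by
  unfold Claim_changed_map_module; decide

theorem map_module_tight : Claim_exact_map_module := by
  intro name _ hd
  rcases hd with ⟨_, h2, h1⟩
  have hall : allSrcOnly name.toList = true := by
    rw [h1]; exact allSrcOnly_flatten _
  have hcore : (stripSrcB name.toList).1 = [] := (allSrcOnly_iff _).1 hall
  have hlen := stripSrcB_core_nil_len _ hcore
  have hns : 2 ≤ numSrc name.toList := by omega
  have hhad : (stripSrcB name.toList).2 = true := by
    rcases srcShape name.toList with ⟨r, hr⟩ | hne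
    · rw [hr, stripSrcB]
    · rw [numSrc_not _ hne] at hns; omega
  unfold map_module map_module_alt
  rw [mapModuleA_char]
  have hmc : mapCoreB (stripSrcB name.toList).1 = none := by rw [hcore]; decide
  simp [hmc, hhad, hcore, hns]
  decide
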